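-- pv_equiv track=rewrite | github.com/Piyush-hacker/GFG_Daily_Solution | Difficulty: Medium/Optimal Strategy For A Game/optimal-strategy-for-a-game.py | maximumAmount
-- ===== SOURCE A (Python) =====
-- def maximumAmount(arr):
--     n = len(arr)
--     dp = [[0] * n for _ in range(n)]
--
--     for g in range(n):
--         for i in range(n - g):
--             j = i + g
--
--             if i == j:
--                 dp[i][j] = arr[i]
--             elif j == i + 1:
--                 dp[i][j] = max(arr[i], arr[j])
--             else:
--                 pick_i = arr[i] + min(dp[i+2][j] if i+2 <= j else 0,
--                                       dp[i+1][j-1] if i+1 <= j-1 else 0)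
--
--                 pick_j = arr[j] + min(dp[i+1][j-1] if i+1 <= j-1 else 0,
--                                       dp[i][j-2] if i <= j-2 else 0)
--
--                 dp[i][j] = max(pick_i, pick_j)
--
--     return dp[0][n-1]
-- ===== SOURCE B (Python) =====
-- def maximumAmount(arr):
--     n = len(arr)
--     prefix = [0] * (n + 1)
--     for k in range(n):
--         prefix[k + 1] = prefix[k] + arr[k]
--     dp = [[0] * n for _ in range(n)]
--     for i in range(n):
--         dp[i][i] = arr[i]
--     for g in range(1, n):
--         for i in range(n - g):
--             j = i + g
--             dp[i][j] = max(arr[i] + (prefix[j + 1] - prefix[i + 1]) - dp[i + 1][j],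
--                            arr[j] + (prefix[j] - prefix[i]) - dp[i][j - 1])
--     return dp[0][n - 1]
-- ===== Notes on version B (the rewrite author's own statement) =====
-- stated objective: alternative
-- what changed: Replaces the min-of-two-deeper-subproblems recurrence by the prefix-sum formulation dp[i][j] = max(arr[i] + S(i+1,j) - dp[i+1][j], arr[j] + S(i,j-1) - dp[i][j-1]), maintaining range sums and the opponent's optimum instead of reading dp two gaps down; same O(n^2) table.
import Mathlib
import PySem

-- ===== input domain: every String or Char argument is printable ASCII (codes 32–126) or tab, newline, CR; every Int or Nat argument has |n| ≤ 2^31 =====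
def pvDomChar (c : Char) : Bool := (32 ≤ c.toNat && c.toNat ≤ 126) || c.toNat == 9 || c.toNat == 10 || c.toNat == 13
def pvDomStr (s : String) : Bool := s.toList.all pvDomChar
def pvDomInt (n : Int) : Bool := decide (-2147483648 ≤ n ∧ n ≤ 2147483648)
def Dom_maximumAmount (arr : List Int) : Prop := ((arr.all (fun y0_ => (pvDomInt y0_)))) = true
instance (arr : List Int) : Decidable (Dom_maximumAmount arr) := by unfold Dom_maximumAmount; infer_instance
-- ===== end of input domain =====

-- B replaces A's min-of-two-deeper-subproblems recurrence by the prefix-sum recurrence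
-- dp[i][j] = max(arr[i] + S(i+1,j) - dp[i+1][j], arr[j] + S(i,j-1) - dp[i][j-1]); same O(n^2) table, no speed claim.

-- ===== PORT A =====
-- The Python 2D table dp (zero-initialised, each cell written once) is ported as an association
-- list of written cells; tblGet reads a cell, 0 for a never-written cell (exact for this program).
def tblGet (t : List ((Nat × Nat) × Int)) (a b : Nat) : Int :=
  match t with
  | [] => 0
  | (p, v) :: rest => if p = (a, b) then v else tblGet rest a b

def maximumAmount (arr : List Int) : Int :=
  let n := arr.length
  let dp : List ((Nat × Nat) × Int) :=
    (List.range n).foldl (fun dp g =>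
      (List.range (n - g)).foldl (fun dp i =>
        let j := i + g
        let v : Int :=
          if i = j then arr.getD i 0
          else if j = i + 1 then max (arr.getD i 0) (arr.getD j 0)
          else
            let pick_i := arr.getD i 0 +
              min (if i + 2 ≤ j then tblGet dp (i+2) j else 0)
                  (if i + 1 ≤ j - 1 then tblGet dp (i+1) (j-1) else 0)
            let pick_j := arr.getD j 0 +
              min (if i + 1 ≤ j - 1 then tblGet dp (i+1) (j-1) else 0)
                  (if i ≤ j - 2 then tblGet dp i (j-2) else 0)
            max pick_i pick_j
        ((i, j), v) :: dp) dp)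
      []
  tblGet dp 0 (n - 1)

-- ===== PORT B =====
-- B's prefix-sum list (cell k+1 written once per loop step) and its dp table are ported the same
-- way, as association lists of written cells with 0 for a never-written cell.
def preGet (t : List (Nat × Int)) (a : Nat) : Int :=
  match t with
  | [] => 0
  | (m, v) :: rest => if m = a then v else preGet rest a

def maximumAmount_alt (arr : List Int) : Int :=
  let n := arr.length
  let pre : List (Nat × Int) :=
    (List.range n).foldl (fun p k => (k + 1, preGet p k + arr.getD k 0) :: p) []
  let dp0 : List ((Nat × Nat) × Int) :=
    (List.range n).foldl (fun dp i => ((i, i), arr.getD i 0) :: dp) []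
  let dp : List ((Nat × Nat) × Int) :=
    (List.range' 1 (n - 1)).foldl (fun dp g =>
      (List.range (n - g)).foldl (fun dp i =>
        let j := i + g
        let v : Int :=
          max (arr.getD i 0 + (preGet pre (j+1) - preGet pre (i+1)) - tblGet dp (i+1) j)
              (arr.getD j 0 + (preGet pre j - preGet pre i) - tblGet dp i (j-1))
        ((i, j), v) :: dp) dp)
      dp0
  tblGet dp 0 (n - 1)

-- ===== PRECONDITION & SPEC =====
-- A raises IndexError (dp[0] on the empty table) on the empty list; Pre_ excludes exactly that input.
def Pre_maximumAmount (arr : List Int) : Prop := arr ≠ []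
instance (arr : List Int) : Decidable (Pre_maximumAmount arr) := by unfold Pre_maximumAmount; infer_instance
def pvWitness_maximumAmount : List Int := [8, 15, 3, 7]

def Spec_maximumAmount (arr : List Int) (out : Int) : Prop := out = maximumAmount_alt arr
instance (arr : List Int) (out : Int) : Decidable (Spec_maximumAmount arr out) := by unfold Spec_maximumAmount; infer_instance

-- ===== CLAIM (what is proved, stated in full; the proofs are below) =====
def Claim_equal_maximumAmount : Prop := ∀ (arr : List Int), Dom_maximumAmount arr → Pre_maximumAmount arr → Spec_maximumAmount arr (maximumAmount arr)

-- ===== LEMMAS AND PROOFS =====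

-- prefix sums of arr and the game-value function both ports compute.
def pvP (arr : List Int) (m : Nat) : Int := (arr.take m).sum

def pvF (arr : List Int) (i j : Nat) : Int :=
  if j ≤ i then arr.getD i 0
  else max (arr.getD i 0 + ((pvP arr (j+1) - pvP arr (i+1)) - pvF arr (i+1) j))
           (arr.getD j 0 + ((pvP arr j - pvP arr i) - pvF arr i (j-1)))
termination_by j - i
decreasing_by all_goals omega

lemma pvP_succ (arr : List Int) (m : Nat) (hm : m < arr.length) :
    pvP arr (m+1) = pvP arr m + arr.getD m 0 := by
  unfold pvP
  rw [List.take_add_one, List.sum_append]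
  simp [List.getElem?_eq_getElem hm, List.getD_eq_getElem?_getD]

lemma sub_max_eq_min (c x y : Int) : c - max x y = min (c - x) (c - y) := by
  rcases le_total x y with h | h
  · rw [max_eq_right h, min_eq_right (by linarith)]
  · rw [max_eq_left h, min_eq_left (by linarith)]

lemma pvF_diag (arr : List Int) (i : Nat) : pvF arr i i = arr.getD i 0 := by
  rw [pvF]; simp

-- "opponent's take": S(a,b) - f(a,b) is 0 on a singleton and min of the two one-step-smaller values otherwise.
lemma pvF_opp (arr : List Int) (a b : Nat) (hab : a ≤ b) (hb : b < arr.length) :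
    (pvP arr (b+1) - pvP arr a) - pvF arr a b =
      if a = b then 0 else min (pvF arr (a+1) b) (pvF arr a (b-1)) := by
  rcases eq_or_lt_of_le hab with rfl | hlt
  · rw [if_pos rfl, pvF_diag, pvP_succ arr a hb]; ring
  · rw [if_neg (by omega), pvF, if_neg (by omega), sub_max_eq_min]
    have ha := pvP_succ arr a (by omega)
    have hbs := pvP_succ arr b hb
    congr 1
    · linarith
    · linarith

-- A's recurrence holds for pvF (gap ≥ 2 case).
lemma pvF_recA (arr : List Int) (i j : Nat) (h2 : i + 2 ≤ j) (hj : j < arr.length) :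
    pvF arr i j =
      max (arr.getD i 0 + min (pvF arr (i+2) j) (pvF arr (i+1) (j-1)))
          (arr.getD j 0 + min (pvF arr (i+1) (j-1)) (pvF arr i (j-2))) := by
  have h1 := pvF_opp arr (i+1) j (by omega) hj
  have h2 := pvF_opp arr i (j-1) (by omega) (by omega)
  rw [if_neg (by omega)] at h1
  rw [if_neg (by omega)] at h2
  have e1 : j - 1 + 1 = j := by omega
  have e2 : j - 1 - 1 = j - 2 := by omega
  rw [e1, e2] at h2
  rw [pvF, if_neg (by omega), h1, h2]

lemma pvF_adj (arr : List Int) (i : Nat) (hj : i + 1 < arr.length) :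
    pvF arr i (i+1) = max (arr.getD i 0) (arr.getD (i+1) 0) := by
  rw [pvF, if_neg (by omega)]
  have h1 := pvP_succ arr (i+1) hj
  have h2 := pvP_succ arr i (by omega)
  simp only [Nat.add_sub_cancel, pvF_diag]
  have e1 : arr.getD i 0 + (pvP arr (i + 1 + 1) - pvP arr (i + 1) - arr.getD (i + 1) 0) = arr.getD i 0 := by linarith
  have e2 : arr.getD (i + 1) 0 + (pvP arr (i + 1) - pvP arr i - arr.getD i 0) = arr.getD (i + 1) 0 := by linarith
  rw [e1, e2]

-- generic invariant rules for foldl over List.range / List.range' 1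
lemma foldl_range_inv {S : Type} (f : S → Nat → S) (P : Nat → S → Prop) :
    ∀ (K : Nat) (s : S), P 0 s → (∀ k t, k < K → P k t → P (k+1) (f t k)) →
      P K ((List.range K).foldl f s)
  | 0, s, h0, _ => by simpa using h0
  | (K+1), s, h0, hstep => by
      rw [List.range_succ, List.foldl_append, List.foldl_cons, List.foldl_nil]
      exact hstep K _ (by omega) (foldl_range_inv f P K s h0 (fun k t hk => hstep k t (by omega)))

lemma foldl_range1_inv {S : Type} (f : S → Nat → S) (P : Nat → S → Prop) :
    ∀ (K : Nat) (s : S), P 0 s → (∀ g t, g < K → P g t → P (g+1) (f t (1+g))) →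
      P K ((List.range' 1 K).foldl f s)
  | 0, s, h0, _ => by simpa using h0
  | (K+1), s, h0, hstep => by
      rw [List.range'_concat, List.foldl_append, List.foldl_cons, List.foldl_nil]
      simp only [Nat.one_mul]
      exact hstep K _ (by omega) (foldl_range1_inv f P K s h0 (fun g t hk => hstep g t (by omega)))

-- table invariant: all entries of gap < G are filled with pvF, the rest read 0
def InvT (arr : List Int) (G : Nat) (dp : List ((Nat × Nat) × Int)) : Prop :=
  ∀ a b, tblGet dp a b = if a ≤ b ∧ b < arr.length ∧ b - a < G then pvF arr a b else 0

lemma portA_eq (arr : List Int) (h1 : arr ≠ []) :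
    maximumAmount arr = pvF arr 0 (arr.length - 1) := by
  have hn1 : 0 < arr.length := List.length_pos_iff.mpr h1
  have main : InvT arr arr.length
      ((List.range arr.length).foldl (fun dp g =>
        (List.range (arr.length - g)).foldl (fun dp i =>
          let j := i + g
          let v : Int :=
            if i = j then arr.getD i 0
            else if j = i + 1 then max (arr.getD i 0) (arr.getD j 0)
            else
              let pick_i := arr.getD i 0 +
                min (if i + 2 ≤ j then tblGet dp (i+2) j else 0)
                    (if i + 1 ≤ j - 1 then tblGet dp (i+1) (j-1) else 0)
              let pick_j := arr.getD j 0 +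
                min (if i + 1 ≤ j - 1 then tblGet dp (i+1) (j-1) else 0)
                    (if i ≤ j - 2 then tblGet dp i (j-2) else 0)
              max pick_i pick_j
          ((i, j), v) :: dp) dp)
        []) := by
    apply foldl_range_inv
    · intro a b; simp only [tblGet]; rw [if_neg (by omega)]
    · intro g dp hg hInv
      have inner := foldl_range_inv
        (fun dp i =>
          let j := i + g
          let v : Int :=
            if i = j then arr.getD i 0
            else if j = i + 1 then max (arr.getD i 0) (arr.getD j 0)
            else
              let pick_i := arr.getD i 0 +
                min (if i + 2 ≤ j then tblGet dp (i+2) j else 0)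
                    (if i + 1 ≤ j - 1 then tblGet dp (i+1) (j-1) else 0)
              let pick_j := arr.getD j 0 +
                min (if i + 1 ≤ j - 1 then tblGet dp (i+1) (j-1) else 0)
                    (if i ≤ j - 2 then tblGet dp i (j-2) else 0)
              max pick_i pick_j
          ((i, j), v) :: dp)
        (fun k dp' => ∀ a b, tblGet dp' a b =
          if (a ≤ b ∧ b < arr.length ∧ b - a < g) ∨ (b = a + g ∧ b < arr.length ∧ a < k)
          then pvF arr a b else 0)
        (arr.length - g) dp
        (by intro a b; rw [hInv a b]; split_ifs <;> first | rfl | omega)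
        (by
          intro k dp' hk hP
          dsimp only
          have hkg : k + g < arr.length := by omega
          have hv :
              (if k = k + g then arr.getD k 0
               else if k + g = k + 1 then max (arr.getD k 0) (arr.getD (k+g) 0)
               else
                 max (arr.getD k 0 +
                       min (if k + 2 ≤ k + g then tblGet dp' (k+2) (k+g) else 0)
                           (if k + 1 ≤ k + g - 1 then tblGet dp' (k+1) (k+g-1) else 0))
                     (arr.getD (k+g) 0 +
                       min (if k + 1 ≤ k + g - 1 then tblGet dp' (k+1) (k+g-1) else 0)
                           (if k ≤ k + g - 2 then tblGet dp' k (k+g-2) else 0))) = pvF arr k (k+g) := by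
            by_cases hg0 : g = 0
            · subst hg0
              simp [pvF_diag]
            by_cases hg1 : g = 1
            · subst hg1; rw [if_neg (by omega), if_pos rfl, pvF_adj arr k (by omega)]
            · have hg2 : 2 ≤ g := by omega
              rw [if_neg (by omega), if_neg (by omega),
                  if_pos (by omega : k + 2 ≤ k + g),
                  if_pos (by omega : k + 1 ≤ k + g - 1),
                  if_pos (by omega : k ≤ k + g - 2),
                  hP (k+2) (k+g), hP (k+1) (k+g-1), hP k (k+g-2),
                  if_pos (by omega), if_pos (by omega), if_pos (by omega)]
              exact (pvF_recA arr k (k+g) (by omega) hkg).symm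
          intro a b
          simp only [tblGet, Prod.mk.injEq]
          by_cases hab : k = a ∧ k + g = b
          · obtain ⟨rfl, rfl⟩ := hab
            rw [if_pos ⟨rfl, rfl⟩, hv, if_pos (by omega)]
          · rw [if_neg hab, hP a b]
            split_ifs <;> first | rfl | omega)
      intro a b
      rw [inner a b]
      split_ifs <;> first | rfl | omega
  have final := main 0 (arr.length - 1)
  rw [if_pos (by omega)] at final
  simpa [maximumAmount] using final

lemma portB_eq (arr : List Int) (h1 : arr ≠ []) :
    maximumAmount_alt arr = pvF arr 0 (arr.length - 1) := by
  have hn1 : 0 < arr.length := List.length_pos_iff.mpr h1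
  -- the prefix-sum list computes pvP on indices ≤ n
  have hpre : ∀ t, t ≤ arr.length →
      preGet ((List.range arr.length).foldl
        (fun p k => (k + 1, preGet p k + arr.getD k 0) :: p) []) t = pvP arr t := by
    have inv := foldl_range_inv
      (fun p k => (k + 1, preGet p k + arr.getD k 0) :: p)
      (fun k p => ∀ t, preGet p t = if 1 ≤ t ∧ t ≤ k then pvP arr t else 0)
      arr.length []
      (by intro t; simp only [preGet]; rw [if_neg (by omega)])
      (by
        intro k p hk hP t
        dsimp only
        simp only [preGet]
        by_cases ht : k + 1 = t
        · subst ht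
          rw [if_pos rfl, if_pos (by omega), hP k, pvP_succ arr k hk]
          split_ifs with h
          · rfl
          · have : k = 0 := by omega
            subst this; simp [pvP]
        · rw [if_neg ht, hP t]
          split_ifs <;> first | rfl | omega)
    intro t ht
    rw [inv t]
    split_ifs with h
    · rfl
    · have : t = 0 := by omega
      subst this; simp [pvP]
  -- the diagonal-initialisation loop gives InvT arr 1
  have hdiag : InvT arr 1
      ((List.range arr.length).foldl
        (fun dp i => ((i, i), arr.getD i 0) :: dp) []) := by
    have inv := foldl_range_inv
      (fun dp i => ((i, i), arr.getD i 0) :: dp)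
      (fun k dp => ∀ a b, tblGet dp a b = if a = b ∧ a < k then pvF arr a b else 0)
      arr.length []
      (by intro a b; simp only [tblGet]; rw [if_neg (by omega)])
      (by
        intro k dp hk hP a b
        dsimp only
        simp only [tblGet, Prod.mk.injEq]
        by_cases hab : k = a ∧ k = b
        · obtain ⟨rfl, rfl⟩ := hab
          rw [if_pos ⟨rfl, rfl⟩, if_pos ⟨rfl, by omega⟩, pvF_diag]
        · rw [if_neg hab, hP a b]
          split_ifs <;> first | rfl | omega)
    intro a b
    rw [inv a b]
    split_ifs <;> first | rfl | omega
  -- the gap loop fills the whole table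
  have gap : ∀ (pre : List (Nat × Int)), (∀ t, t ≤ arr.length → preGet pre t = pvP arr t) →
      ∀ (dp0 : List ((Nat × Nat) × Int)), InvT arr 1 dp0 →
      InvT arr (arr.length - 1 + 1)
        ((List.range' 1 (arr.length - 1)).foldl (fun dp g =>
          (List.range (arr.length - g)).foldl (fun dp i =>
            let j := i + g
            let v : Int :=
              max (arr.getD i 0 + (preGet pre (j+1) - preGet pre (i+1)) - tblGet dp (i+1) j)
                  (arr.getD j 0 + (preGet pre j - preGet pre i) - tblGet dp i (j-1))
            ((i, j), v) :: dp) dp)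
          dp0) := by
    intro pre hpre' dp0 h0
    have res := foldl_range1_inv
      (fun dp g =>
        (List.range (arr.length - g)).foldl (fun dp i =>
          let j := i + g
          let v : Int :=
            max (arr.getD i 0 + (preGet pre (j+1) - preGet pre (i+1)) - tblGet dp (i+1) j)
                (arr.getD j 0 + (preGet pre j - preGet pre i) - tblGet dp i (j-1))
          ((i, j), v) :: dp) dp)
      (fun g dp => InvT arr (g+1) dp)
      (arr.length - 1) dp0 h0
      (by
        intro g dp hg hdp
        have inner := foldl_range_inv
          (fun dp i =>
            let j := i + (1+g)
            let v : Int :=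
              max (arr.getD i 0 + (preGet pre (j+1) - preGet pre (i+1)) - tblGet dp (i+1) j)
                  (arr.getD j 0 + (preGet pre j - preGet pre i) - tblGet dp i (j-1))
            ((i, j), v) :: dp)
          (fun k dp' => ∀ a b, tblGet dp' a b =
            if (a ≤ b ∧ b < arr.length ∧ b - a < g + 1) ∨ (b = a + (1+g) ∧ b < arr.length ∧ a < k)
            then pvF arr a b else 0)
          (arr.length - (1+g)) dp
          (by intro a b; rw [hdp a b]; split_ifs <;> first | rfl | omega)
          (by
            intro k dp' hk hP
            dsimp only
            have hkg : k + (1+g) < arr.length := by omega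
            have hv :
                max (arr.getD k 0 + (preGet pre (k+(1+g)+1) - preGet pre (k+1)) - tblGet dp' (k+1) (k+(1+g)))
                    (arr.getD (k+(1+g)) 0 + (preGet pre (k+(1+g)) - preGet pre k) - tblGet dp' k (k+(1+g)-1))
                  = pvF arr k (k+(1+g)) := by
              conv_rhs => rw [pvF]
              rw [if_neg (by omega : ¬ (k + (1+g) ≤ k))]
              rw [hpre' (k+(1+g)+1) (by omega), hpre' (k+1) (by omega),
                  hpre' (k+(1+g)) (by omega), hpre' k (by omega),
                  hP (k+1) (k+(1+g)), hP k (k+(1+g)-1),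
                  if_pos (by omega), if_pos (by omega)]
              congr 1 <;> ring
            intro a b
            simp only [tblGet, Prod.mk.injEq]
            by_cases hab : k = a ∧ k + (1+g) = b
            · obtain ⟨rfl, rfl⟩ := hab
              rw [if_pos ⟨rfl, rfl⟩, hv, if_pos (by omega)]
            · rw [if_neg hab, hP a b]
              split_ifs <;> first | rfl | omega)
        intro a b
        have h2 : (if (a ≤ b ∧ b < arr.length ∧ b - a < g + 1) ∨
              (b = a + (1+g) ∧ b < arr.length ∧ a < arr.length - (1+g)) then pvF arr a b else 0)
            = (if a ≤ b ∧ b < arr.length ∧ b - a < g + 1 + 1 then pvF arr a b else 0) := by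
          split_ifs <;> first | rfl | omega
        exact (inner a b).trans h2)
    exact res
  have final := gap _ (fun t ht => hpre t ht) _ hdiag 0 (arr.length - 1)
  rw [if_pos (by omega)] at final
  simpa [maximumAmount_alt] using final

-- ===== VERDICT (by name: the statement is the Claim_ definition above) =====
theorem maximumAmount_spec : Claim_equal_maximumAmount := by
  intro arr _ hp
  unfold Spec_maximumAmount
  rw [portA_eq arr hp, portB_eq arr hp]
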